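-- pv_equiv track=rewrite | github.com/Bowarc/Lump | appfiles/utils/plugin.py | custom_sorting
-- ===== SOURCE A (Python) =====
-- def custom_sorting(modules, order):
--     output = []
--     for o in order:
--         if o in modules:
--             # self.logger.info(f"Sort found: {o}")
--             output.append(modules.pop(modules.index(o)))
--         else:
--             pass
--             # self.logger.warning(f"Found no match for: {o}")
--
--     output.extend(modules)
--     return output
-- ===== SOURCE B (Python) =====
-- def custom_sorting(modules, order):
--     # Counter-based O(len(modules)+len(order)); does not mutate `modules`
--     # (A pops matched items out of it) -- return value is identical.
--     counts = {}
--     for m in modules: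
--         counts[m] = counts.get(m, 0) + 1
--     taken = {}
--     output = []
--     for o in order:
--         if taken.get(o, 0) < counts.get(o, 0):
--             taken[o] = taken.get(o, 0) + 1
--             output.append(o)
--     for m in modules:
--         if taken.get(m, 0) > 0:
--             taken[m] = taken.get(m, 0) - 1
--         else:
--             output.append(m)
--     return output
-- ===== Notes on version B (the rewrite author's own statement) =====
-- stated objective: faster
-- what changed: Replaces A's per-order-item linear membership test plus list.index/pop over the shrinking modules list with two counter dicts (occurrence counts and taken counts) consumed in two single passes, so no inner scan remains.
import Mathlib
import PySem

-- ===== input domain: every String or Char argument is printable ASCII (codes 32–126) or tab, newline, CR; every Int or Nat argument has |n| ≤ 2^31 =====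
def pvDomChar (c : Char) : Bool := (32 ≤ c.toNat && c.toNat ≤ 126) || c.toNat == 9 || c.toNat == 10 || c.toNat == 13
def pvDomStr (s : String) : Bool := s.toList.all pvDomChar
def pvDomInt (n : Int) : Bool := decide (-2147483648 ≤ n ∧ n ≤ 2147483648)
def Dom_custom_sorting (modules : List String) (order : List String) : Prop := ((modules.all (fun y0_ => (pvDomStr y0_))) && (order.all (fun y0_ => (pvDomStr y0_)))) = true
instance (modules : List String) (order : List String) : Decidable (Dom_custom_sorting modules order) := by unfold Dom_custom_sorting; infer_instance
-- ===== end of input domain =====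

-- B replaces A's quadratic scan/pop over `modules` with two counter dicts (O(n+m));
-- A mutates `modules` in place (pop) while B does not — the equivalence is about the return value.


-- ===== PORT A =====
-- one iteration of A's `for o in order` loop: state = (modules, output)
def csStepA (st : List String × List String) (o : String) : List String × List String :=
  if st.1.contains o then
    match PySem.List.index? st.1 o with
    | some i =>
      match PySem.List.pop? st.1 (i : Int) with
      | some r => (r.2, st.2 ++ [r.1])
      | none => st
    | none => st
  else st

def custom_sorting (modules : List String) (order : List String) : List String :=
  let st := order.foldl csStepA (modules, [])
  st.2 ++ st.1

-- ===== PORT B =====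
-- first loop of B: state = (taken, output)
def csStepB (counts : PySem.Dict String Int) (st : PySem.Dict String Int × List String)
    (o : String) : PySem.Dict String Int × List String :=
  if st.1.getD o 0 < counts.getD o 0 then (st.1.insert o (st.1.getD o 0 + 1), st.2 ++ [o]) else st

-- second loop of B: skip the first taken[m] occurrences, append the rest
def csStepC (st : PySem.Dict String Int × List String) (m : String) :
    PySem.Dict String Int × List String :=
  if st.1.getD m 0 > 0 then (st.1.insert m (st.1.getD m 0 - 1), st.2) else (st.1, st.2 ++ [m])

def custom_sorting_alt (modules : List String) (order : List String) : List String :=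
  let counts := modules.foldl (fun d m => d.insert m (d.getD m 0 + 1)) PySem.Dict.empty
  let st := order.foldl (csStepB counts) (PySem.Dict.empty, [])
  (modules.foldl csStepC st).2

-- ===== PRECONDITION & SPEC =====
def Spec_custom_sorting (modules : List String) (order : List String) (out : List String) : Prop := out = custom_sorting_alt modules order
instance (modules : List String) (order : List String) (out : List String) : Decidable (Spec_custom_sorting modules order out) := by unfold Spec_custom_sorting; infer_instance

-- ===== CLAIM (what is proved, stated in full; the proofs are below) =====
def Claim_equal_custom_sorting : Prop := ∀ (modules : List String) (order : List String), Dom_custom_sorting modules order → Spec_custom_sorting modules order (custom_sorting modules order)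

-- ===== LEMMAS AND PROOFS =====

-- the sublist of xs after removing, for each value v, its first (f v) occurrences
def skipF (f : String → Int) : List String → List String
  | [] => []
  | x :: xs => if 0 < f x then skipF (Function.update f x (f x - 1)) xs else x :: skipF f xs

-- the counter dict as a function
def tf (t : PySem.Dict String Int) : String → Int := fun v => t.getD v 0

lemma tf_insert (t : PySem.Dict String Int) (x : String) (a : Int) :
    tf (t.insert x a) = Function.update (tf t) x a := by
  funext v
  simp [tf, PySem.Dict.getD_insert, Function.update_apply]

lemma skipF_of_nonpos (f : String → Int) (xs : List String) (h : ∀ v, f v ≤ 0) :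
    skipF f xs = xs := by
  induction xs with
  | nil => rfl
  | cons x xs ih => simp [skipF, not_lt.mpr (h x), ih]

lemma mem_skipF (f : String → Int) (xs : List String) (o : String) (hf : ∀ v, 0 ≤ f v) :
    o ∈ skipF f xs ↔ f o < (xs.count o : Int) := by
  induction xs generalizing f with
  | nil => simp [skipF, not_lt.mpr (hf o)]
  | cons x xs ih =>
    by_cases hx : 0 < f x
    · rw [skipF, if_pos hx, ih _ (by
        intro v; by_cases hv : v = x
        · subst hv; simp [Function.update_apply]; omega
        · simp [Function.update_apply, hv]; exact hf v)]
      by_cases ho : o = x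
      · subst ho; simp [Function.update_apply, List.count_cons]
      · simp [Function.update_apply, ho, List.count_cons, Ne.symm ho]
    · rw [skipF, if_neg hx]
      by_cases ho : o = x
      · subst ho
        simp [List.count_cons]
        have := hf o; omega
      · simp [ho, List.count_cons, Ne.symm ho, ih f hf]

lemma erase_skipF (f : String → Int) (xs : List String) (o : String)
    (hf : ∀ v, 0 ≤ f v) (hlt : f o < (xs.count o : Int)) :
    (skipF f xs).erase o = skipF (Function.update f o (f o + 1)) xs := by
  induction xs generalizing f with
  | nil => simp at hlt; have := hf o; omega
  | cons x xs ih =>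
    by_cases hx : 0 < f x
    · have hx' : 0 < Function.update f o (f o + 1) x := by
        by_cases ho : o = x
        · subst ho; simp [Function.update_apply]; omega
        · simpa [Function.update_apply, Ne.symm ho] using hx
      rw [skipF, if_pos hx, skipF, if_pos hx']
      by_cases ho : o = x
      · subst ho
        have hlt' : Function.update f o (f o - 1) o < (xs.count o : Int) := by
          simp [Function.update_apply, List.count_cons] at hlt ⊢; omega
        rw [ih _ (by
          intro v; by_cases hv : v = o
          · subst hv; simp [Function.update_apply]; omega
          · simp [Function.update_apply, hv]; exact hf v) hlt']
        congr 1
        funext v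
        by_cases hv : v = o
        · subst hv; simp [Function.update_apply]
        · simp [Function.update_apply, hv]
      · have hlt' : Function.update f x (f x - 1) o < (xs.count o : Int) := by
          simp [Function.update_apply, ho, List.count_cons, Ne.symm ho] at hlt ⊢; omega
        rw [ih _ (by
          intro v; by_cases hv : v = x
          · subst hv; simp [Function.update_apply]; omega
          · simp [Function.update_apply, hv]; exact hf v) hlt']
        congr 1
        funext v
        by_cases hvx : v = x
        · subst hvx; simp [Function.update_apply, Ne.symm ho]
        · by_cases hvo : v = o
          · subst hvo; simp [Function.update_apply, ho, hvx]
          · simp [Function.update_apply, hvx, hvo]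
    · rw [skipF, if_neg hx]
      by_cases ho : o = x
      · subst ho
        have hfo : f o = 0 := le_antisymm (not_lt.mp hx) (hf o)
        rw [skipF]
        have : 0 < Function.update f o (f o + 1) o := by simp [Function.update_apply]; omega -- FIX
        rw [if_pos this]
        have : Function.update (Function.update f o (f o + 1)) o
            (Function.update f o (f o + 1) o - 1) = f := by
          funext v
          by_cases hv : v = o
          · subst hv; simp [Function.update_apply]
          · simp [Function.update_apply, hv]
        rw [this, List.erase_cons_head]
      · have hx' : ¬ 0 < Function.update f o (f o + 1) x := by
          simpa [Function.update_apply, Ne.symm ho] using hx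
        rw [skipF, if_neg hx', List.erase_cons_tail (by simp [Ne.symm ho])]
        congr 1
        exact ih f hf (by simpa [List.count_cons, Ne.symm ho] using hlt)

-- A's loop step, on a member, removes the first occurrence and appends it
lemma csStepA_mem (mods out : List String) (o : String) (ho : o ∈ mods) :
    csStepA (mods, out) o = (mods.erase o, out ++ [o]) := by
  have hc : mods.contains o = true := by simpa [List.contains_iff_mem] using ho
  obtain ⟨k, hk⟩ : ∃ k, PySem.List.index? mods o = some k := by
    have := (PySem.List.index?_isSome_iff (xs := mods) (v := o)).mpr ho
    exact Option.isSome_iff_exists.mp this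
  obtain ⟨hklt, hgk, _⟩ := PySem.List.getElem_of_index?_eq_some hk
  have hpop : PySem.List.pop? mods (k : Int) = some (mods[k], mods.eraseIdx k) :=
    PySem.List.pop?_natCast mods k hklt
  have herase : mods.erase o = mods.eraseIdx k := by
    have := List.erase_eq_eraseIdx mods o
    rw [this]
    have : List.idxOf? o mods = some k := by
      have := PySem.List.index?_eq_idxOf? (xs := mods) (v := o)
      rw [← this, hk]
    simp [this]
  have hk' : List.idxOf? o mods = some k := by
    rw [← PySem.List.index?_eq_idxOf?]; exact hk
  rw [herase]
  simp [csStepA, ho, hk', hpop, hgk]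

lemma csStepA_not_mem (mods out : List String) (o : String) (ho : o ∉ mods) :
    csStepA (mods, out) o = (mods, out) := by
  have hc : mods.contains o = false := by simpa [List.contains_iff_mem] using ho
  simp [csStepA, hc]
  exact fun h => absurd h ho

-- main loop correspondence: A's fold over `order` tracks B's first fold through skipF
lemma loop_corr (modules : List String) (counts : PySem.Dict String Int)
    (hc : ∀ v, counts.getD v 0 = (modules.count v : Int)) :
    ∀ (ord : List String) (t : PySem.Dict String Int) (out : List String),
      (∀ v, 0 ≤ tf t v) →
      ord.foldl csStepA (skipF (tf t) modules, out) =
        ((skipF (tf (ord.foldl (csStepB counts) (t, out)).1) modules),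
         (ord.foldl (csStepB counts) (t, out)).2) := by
  intro ord
  induction ord with
  | nil => intro t out ht; simp
  | cons o rest ih =>
    intro t out ht
    by_cases hcond : t.getD o 0 < counts.getD o 0
    · have hmem : o ∈ skipF (tf t) modules := by
        rw [mem_skipF _ _ _ ht]
        have := hc o
        simpa [tf, this] using hcond
      have hlt : tf t o < (modules.count o : Int) := (mem_skipF _ _ _ ht).mp hmem
      have hstepA := csStepA_mem (skipF (tf t) modules) out o hmem
      have hstepB : csStepB counts (t, out) o = (t.insert o (t.getD o 0 + 1), out ++ [o]) := by
        simp [csStepB, hcond]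
      rw [List.foldl_cons, hstepA, erase_skipF _ _ _ ht hlt, ← tf_insert,
          List.foldl_cons, hstepB]
      exact ih _ _ (by
        intro v
        rw [tf_insert]
        by_cases hv : v = o
        · have h2 : (0:Int) ≤ t.getD o 0 := ht o
          simp [tf, Function.update_apply, hv]; omega
        · simp [Function.update_apply, hv]; exact ht v)
    · have hnmem : o ∉ skipF (tf t) modules := by
        rw [mem_skipF _ _ _ ht]
        rw [hc o] at hcond
        exact fun h => hcond h
      have hstepB : csStepB counts (t, out) o = (t, out) := by simp [csStepB, hcond]
      rw [List.foldl_cons, csStepA_not_mem _ _ _ hnmem, List.foldl_cons, hstepB]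
      exact ih t out ht

-- B's second fold produces out ++ skipF
lemma loop2_skipF : ∀ (xs : List String) (t : PySem.Dict String Int) (out : List String),
    (xs.foldl csStepC (t, out)).2 = out ++ skipF (tf t) xs := by
  intro xs
  induction xs with
  | nil => intro t out; simp [skipF]
  | cons x rest ih =>
    intro t out
    by_cases hx : t.getD x 0 > 0
    · have : csStepC (t, out) x = (t.insert x (t.getD x 0 - 1), out) := by simp [csStepC, hx]
      rw [List.foldl_cons, this, ih, skipF, if_pos (by simpa [tf] using hx), tf_insert]
      rfl
    · have : csStepC (t, out) x = (t, out ++ [x]) := by simp [csStepC, hx]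
      rw [List.foldl_cons, this, ih, skipF, if_neg (by simpa [tf] using hx)]
      simp

lemma tf_empty : tf (PySem.Dict.empty : PySem.Dict String Int) = fun _ => 0 := by
  funext v; simp [tf, PySem.Dict.getD_empty]

-- ===== VERDICT (by name: the statement is the Claim_ definition above) =====
theorem custom_sorting_spec : Claim_equal_custom_sorting := by
  intro modules order _
  unfold Spec_custom_sorting custom_sorting custom_sorting_alt
  have hcounts : (modules.foldl (fun d m => d.insert m (d.getD m 0 + 1)) PySem.Dict.empty) =
      PySem.Dict.counter modules := PySem.Dict.foldl_insert_getD_add_one_eq_counter modules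
  rw [hcounts]
  have hc : ∀ v, (PySem.Dict.counter modules).getD v 0 = (modules.count v : Int) := fun v =>
    PySem.Dict.getD_counter modules v
  have hstart : modules = skipF (tf (PySem.Dict.empty : PySem.Dict String Int)) modules := by
    rw [tf_empty, skipF_of_nonpos _ _ (fun _ => le_refl 0)]
  have hmain := loop_corr modules (PySem.Dict.counter modules) hc order
      PySem.Dict.empty [] (by rw [tf_empty]; intro v; exact le_refl 0)
  rw [loop2_skipF]
  conv_lhs => rw [hstart]
  rw [hmain]
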